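-- pv_equiv track=rewrite | github.com/alejan-rumart/CXRClassifier-demo | app/streamlit_app.py | _intersect_labels
-- ===== SOURCE A (Python) =====
-- from typing import Dict, Tuple, List
--
-- def _intersect_labels(models: Dict[str, Tuple]) -> List[str]:
--     if not models:
--         return []
--     sets = []
--     for _, (_, labels, _) in models.items():
--         sets.append(set([l.lower() for l in labels]))
--     common = set.intersection(*sets) if sets else set()
--     return sorted(common)
-- ===== SOURCE B (Python) =====
-- def _intersect_labels(models):
--     if not models:
--         return []
--     counts = {}
--     for _, (_, labels, _) in models.items():
--         for l in set(l.lower() for l in labels):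
--             counts[l] = counts.get(l, 0) + 1
--     n = len(models)
--     return sorted(l for l, c in counts.items() if c == n)
-- ===== Notes on version B (the rewrite author's own statement) =====
-- stated objective: alternative
-- what changed: Replaces the per-model list of sets plus set.intersection(*sets) by a single counting dict mapping each lowercased label to the number of models whose label set contains it, keeping exactly the labels counted len(models) times, then sorting.
import Mathlib
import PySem

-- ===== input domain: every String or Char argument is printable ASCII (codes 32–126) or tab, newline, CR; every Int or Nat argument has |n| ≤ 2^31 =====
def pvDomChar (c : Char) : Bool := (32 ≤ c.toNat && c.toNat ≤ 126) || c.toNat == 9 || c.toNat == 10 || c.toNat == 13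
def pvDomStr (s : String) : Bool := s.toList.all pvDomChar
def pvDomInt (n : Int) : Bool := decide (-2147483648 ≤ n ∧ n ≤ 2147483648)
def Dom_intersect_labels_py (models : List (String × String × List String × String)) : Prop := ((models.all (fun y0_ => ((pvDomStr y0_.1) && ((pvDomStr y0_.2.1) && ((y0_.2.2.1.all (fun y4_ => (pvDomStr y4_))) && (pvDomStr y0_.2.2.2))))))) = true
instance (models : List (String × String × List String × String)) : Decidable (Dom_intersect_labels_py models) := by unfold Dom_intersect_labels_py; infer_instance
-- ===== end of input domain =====

-- B replaces the per-model set list + set.intersection of A by a single counting dict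
-- (label -> number of models containing it), keeping labels counted len(models) times; alternative decomposition, no speed claim.

-- set([l.lower() for l in labels]) — the lowered label set of one model (used verbatim by both Pythons)
def pvLowerSet (m : String × String × List String × String) : List String :=
  PySem.Set.ofList (m.2.2.1.map PySem.Str.lower)

-- ===== PORT A =====
def intersect_labels_py (models : List (String × String × List String × String)) : List String :=
  if models = [] then []
  else
    let sets := models.foldl (fun acc m => acc ++ [pvLowerSet m]) ([] : List (List String))
    -- set.intersection(*sets): members of the first set lying in every other (value-exact; order is erased by sorted)
    let common : List String :=
      match sets with
      | [] => []
      | s0 :: rest => rest.foldl (fun acc s => acc.filter (fun x => decide (x ∈ s))) s0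
    PySem.List.sorted common (fun x => x) false

-- ===== PORT B =====
def intersect_labels_py_alt (models : List (String × String × List String × String)) : List String :=
  if models = [] then []
  else
    let counts := models.foldl
      (fun d m => (pvLowerSet m).foldl (fun d l => d.insert l (d.getD l 0 + 1)) d)
      (PySem.Dict.empty : PySem.Dict String Int)
    let n : Int := models.length
    PySem.List.sorted ((counts.items.filter (fun p => p.2 == n)).map (·.1)) (fun x => x) false

-- ===== PRECONDITION & SPEC =====
def Spec_intersect_labels_py (models : List (String × String × List String × String)) (out : List String) : Prop := out = intersect_labels_py_alt models
instance (models : List (String × String × List String × String)) (out : List String) : Decidable (Spec_intersect_labels_py models out) := by unfold Spec_intersect_labels_py; infer_instance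

-- ===== CLAIM (what is proved, stated in full; the proofs are below) =====
def Claim_equal_intersect_labels_py : Prop := ∀ (models : List (String × String × List String × String)), Dom_intersect_labels_py models → Spec_intersect_labels_py models (intersect_labels_py models)

-- ===== LEMMAS AND PROOFS =====

theorem mem_foldl_filter (sets : List (List String)) (s0 : List String) (x : String) :
    (x ∈ sets.foldl (fun acc s => acc.filter (fun y => decide (y ∈ s))) s0) ↔
      (x ∈ s0 ∧ ∀ s ∈ sets, x ∈ s) := by
  induction sets generalizing s0 with
  | nil => simp
  | cons s rest ih =>
    simp only [List.foldl_cons, ih, List.mem_filter, decide_eq_true_eq, List.mem_cons]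
    constructor
    · rintro ⟨⟨h0, hs⟩, hall⟩
      refine ⟨h0, ?_⟩
      rintro t (rfl | ht)
      · exact hs
      · exact hall t ht
    · rintro ⟨h0, hall⟩
      exact ⟨⟨h0, hall s (Or.inl rfl)⟩, fun t ht => hall t (Or.inr ht)⟩

theorem nodup_foldl_filter (sets : List (List String)) (s0 : List String) (h : s0.Nodup) :
    (sets.foldl (fun acc s => acc.filter (fun y => decide (y ∈ s))) s0).Nodup := by
  induction sets generalizing s0 with
  | nil => simpa
  | cons s rest ih => exact ih _ (h.filter _)

theorem count_flatMap_lowerSet (models : List (String × String × List String × String)) (x : String) :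
    (models.flatMap pvLowerSet).count x = models.countP (fun m => decide (x ∈ pvLowerSet m)) := by
  induction models with
  | nil => simp
  | cons m ms ih =>
    simp only [List.flatMap_cons, List.count_append, ih, List.countP_cons]
    have hnd : (pvLowerSet m).Nodup := PySem.Set.nodup_ofList _
    by_cases hx : x ∈ pvLowerSet m
    · simp [List.count_eq_one_of_mem hnd hx, hx, Nat.add_comm]
    · simp [List.count_eq_zero.mpr hx, hx]

theorem intersect_labels_py_spec' (models : List (String × String × List String × String)) :
    intersect_labels_py models = intersect_labels_py_alt models := by
  unfold intersect_labels_py intersect_labels_py_alt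
  by_cases hne : models = []
  · simp [hne]
  · simp only [if_neg hne]
    -- normalise A's set list to a map
    rw [PySem.List.foldl_append_singleton_eq_map]
    -- normalise B's dict to a counter over the flattened lowered sets
    rw [show models.foldl
          (fun d m => (pvLowerSet m).foldl (fun d l => d.insert l (d.getD l 0 + 1)) d)
          (PySem.Dict.empty : PySem.Dict String Int)
        = (models.flatMap pvLowerSet).foldl (fun d l => d.insert l (d.getD l 0 + 1)) PySem.Dict.empty
      from (List.foldl_flatMap).symm,
      PySem.Dict.foldl_insert_getD_add_one_eq_counter, PySem.Dict.items_counter]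
    obtain ⟨m, ms, rfl⟩ := List.exists_cons_of_ne_nil hne
    simp only [List.nil_append, List.map_cons]
    apply PySem.List.sorted_eq_sorted_of_perm _ _ _ (fun a b h => h)
    rw [List.filter_map, List.map_map]
    apply (List.perm_ext_iff_of_nodup _ _).mpr
    · intro x
      rw [mem_foldl_filter]
      simp only [List.mem_map, List.mem_filter, Function.comp]
      constructor
      · rintro ⟨hm, hall⟩
        refine ⟨x, ⟨?_, ?_⟩, rfl⟩
        · exact (PySem.Set.mem_ofList _ _).mpr
            (List.mem_flatMap.mpr ⟨m, List.mem_cons_self .., hm⟩)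
        · have h1 : List.count x (pvLowerSet m) = 1 :=
            List.count_eq_one_of_mem (PySem.Set.nodup_ofList _) hm
          have h2 : List.count x (List.flatMap pvLowerSet ms) = ms.length := by
            rw [count_flatMap_lowerSet]
            exact List.countP_eq_length.mpr (fun t ht => decide_eq_true (hall _ ⟨t, ht, rfl⟩))
          simp only [List.flatMap_cons, List.count_append, List.length_cons, beq_iff_eq]
          rw [h1, h2]
          push_cast
          ring
      · rintro ⟨y, ⟨hyL, hyc⟩, rfl⟩
        have hint : (↑(List.count y (List.flatMap pvLowerSet (m :: ms))) : Int)
            = ↑(m :: ms).length := eq_of_beq hyc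
        have hcnt : List.count y (List.flatMap pvLowerSet (m :: ms)) = (m :: ms).length := by
          exact_mod_cast hint
        simp only [List.flatMap_cons, List.count_append, List.length_cons] at hcnt
        have h2 : List.count y (List.flatMap pvLowerSet ms) ≤ ms.length := by
          rw [count_flatMap_lowerSet]; exact List.countP_le_length ..
        have h1 : List.count y (pvLowerSet m) ≤ 1 :=
          List.nodup_iff_count_le_one.mp (PySem.Set.nodup_ofList _) y
        have hms : List.count y (List.flatMap pvLowerSet ms) = ms.length := by omega
        rw [count_flatMap_lowerSet] at hms
        have hall := List.countP_eq_length.mp hms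
        refine ⟨List.count_pos_iff.mp (by omega), ?_⟩
        rintro s ⟨t, ht, rfl⟩
        exact of_decide_eq_true (hall t ht)
    · exact nodup_foldl_filter _ _ (PySem.Set.nodup_ofList _)
    · exact List.Nodup.map (fun a b h => by simpa using h) ((PySem.Set.nodup_ofList _).filter _)

-- ===== VERDICT (by name: the statement is the Claim_ definition above) =====
theorem intersect_labels_py_spec : Claim_equal_intersect_labels_py := by
  intro models _
  exact intersect_labels_py_spec' models
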